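-- pv_equiv track=rewrite | github.com/set718/PPT-Agent | ppt_advanced_analyzer.py | _count_hierarchy_levels
-- ===== SOURCE A (Python) =====
-- from typing import Dict, List, Any, Optional, Tuple, TYPE_CHECKING
--
-- def _count_hierarchy_levels(content: Dict[str, str]) -> int:
--     """计算层次级别数"""
--     levels = set()
--
--     for placeholder in content.keys():
--         if 'title' in placeholder.lower():
--             levels.add(1)
--         elif 'subtitle' in placeholder.lower():
--             levels.add(2)
--         elif 'content' in placeholder.lower():
--             levels.add(3)
--         elif 'bullet' in placeholder.lower():
--             levels.add(4)
--         elif 'description' in placeholder.lower():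
--             levels.add(5)
--
--     return len(levels)
-- ===== SOURCE B (Python) =====
-- def _count_hierarchy_levels(content):
--     """计算层次级别数"""
--     keywords = ['title', 'subtitle', 'content', 'bullet', 'description']
--     keys = [k.lower() for k in content.keys()]
--     count = 0
--     for i, kw in enumerate(keywords):
--         if any(kw in k and all(w not in k for w in keywords[:i]) for k in keys):
--             count += 1
--     return count
-- ===== Notes on version B (the rewrite author's own statement) =====
-- stated objective: alternative
-- what changed: Inverts the loops: instead of scanning keys and accumulating matched levels in a set, B iterates over a data-driven keyword table and counts, for each level, whether any lowercased key first-matches that keyword, so no set is built at all.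
import Mathlib
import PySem

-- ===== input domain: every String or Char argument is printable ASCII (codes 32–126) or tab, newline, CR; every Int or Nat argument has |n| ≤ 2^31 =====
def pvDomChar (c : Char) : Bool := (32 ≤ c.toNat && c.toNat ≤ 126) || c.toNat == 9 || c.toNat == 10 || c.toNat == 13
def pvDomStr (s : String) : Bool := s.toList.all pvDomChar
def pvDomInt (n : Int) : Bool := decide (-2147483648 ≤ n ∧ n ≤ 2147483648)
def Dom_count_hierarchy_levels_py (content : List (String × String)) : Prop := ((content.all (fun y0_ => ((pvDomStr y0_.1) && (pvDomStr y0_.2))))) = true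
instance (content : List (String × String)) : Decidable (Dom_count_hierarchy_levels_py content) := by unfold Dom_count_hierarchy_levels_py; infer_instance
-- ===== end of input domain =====

-- B inverts the loops: instead of scanning keys and accumulating matched levels in a set,
-- it scans a keyword table and counts the levels some lowercased key first-matches (no set built).

-- ===== PORT A =====
def count_hierarchy_levels_py (content : List (String × String)) : Int :=
  let levels := content.foldl (fun levels kv =>
    if PySem.Str.isIn "title" (PySem.Str.lower kv.1) then PySem.Set.add levels (1 : Int)
    else if PySem.Str.isIn "subtitle" (PySem.Str.lower kv.1) then PySem.Set.add levels 2
    else if PySem.Str.isIn "content" (PySem.Str.lower kv.1) then PySem.Set.add levels 3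
    else if PySem.Str.isIn "bullet" (PySem.Str.lower kv.1) then PySem.Set.add levels 4
    else if PySem.Str.isIn "description" (PySem.Str.lower kv.1) then PySem.Set.add levels 5
    else levels) PySem.Set.empty
  Int.ofNat levels.length

-- ===== PORT B =====
def count_hierarchy_levels_py_alt (content : List (String × String)) : Int :=
  let keywords : List String := ["title", "subtitle", "content", "bullet", "description"]
  let keys := content.map (fun kv => PySem.Str.lower kv.1)
  (PySem.List.enumerate keywords).foldl (fun count ikw =>
    if keys.any (fun k => PySem.Str.isIn ikw.2 k &&
        (keywords.take ikw.1.toNat).all (fun w => !PySem.Str.isIn w k))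
    then count + 1 else count) (0 : Int)

-- ===== PRECONDITION & SPEC =====
def Spec_count_hierarchy_levels_py (content : List (String × String)) (out : Int) : Prop := out = count_hierarchy_levels_py_alt content
instance (content : List (String × String)) (out : Int) : Decidable (Spec_count_hierarchy_levels_py content out) := by unfold Spec_count_hierarchy_levels_py; infer_instance

-- ===== CLAIM (what is proved, stated in full; the proofs are below) =====
def Claim_equal_count_hierarchy_levels_py : Prop := ∀ (content : List (String × String)), Dom_count_hierarchy_levels_py content → Spec_count_hierarchy_levels_py content (count_hierarchy_levels_py content)

-- ===== LEMMAS AND PROOFS =====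

/-- The level A's elif cascade assigns to a placeholder, if any. -/
def pvLvl (p : String) : Option Int :=
  if PySem.Str.isIn "title" (PySem.Str.lower p) then some 1
  else if PySem.Str.isIn "subtitle" (PySem.Str.lower p) then some 2
  else if PySem.Str.isIn "content" (PySem.Str.lower p) then some 3
  else if PySem.Str.isIn "bullet" (PySem.Str.lower p) then some 4
  else if PySem.Str.isIn "description" (PySem.Str.lower p) then some 5
  else none

lemma pvUpdate_cons (s : List Int) (a : Int) (l : List Int) :
    PySem.Set.update s (a :: l) = PySem.Set.update (PySem.Set.add s a) l := rfl

lemma pvFoldA (content : List (String × String)) (s : List Int) :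
    content.foldl (fun levels kv =>
      if PySem.Str.isIn "title" (PySem.Str.lower kv.1) then PySem.Set.add levels (1 : Int)
      else if PySem.Str.isIn "subtitle" (PySem.Str.lower kv.1) then PySem.Set.add levels 2
      else if PySem.Str.isIn "content" (PySem.Str.lower kv.1) then PySem.Set.add levels 3
      else if PySem.Str.isIn "bullet" (PySem.Str.lower kv.1) then PySem.Set.add levels 4
      else if PySem.Str.isIn "description" (PySem.Str.lower kv.1) then PySem.Set.add levels 5
      else levels) s
    = PySem.Set.update s (content.filterMap (fun kv => pvLvl kv.1)) := by
  induction content generalizing s with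
  | nil => rfl
  | cons kv rest ih =>
      rw [List.foldl_cons, List.filterMap_cons]
      unfold pvLvl
      split_ifs <;> (try rw [pvUpdate_cons]) <;> exact ih _

lemma pvLvl_mem {p : String} {v : Int} (h : pvLvl p = some v) :
    v ∈ ([1, 2, 3, 4, 5] : List Int) := by
  unfold pvLvl at h
  split_ifs at h <;> simp_all

lemma pvTest1 (p : String) :
    PySem.Str.isIn "title" (PySem.Str.lower p) = (pvLvl p == some 1) := by
  unfold pvLvl; split_ifs <;> simp_all

lemma pvTest2 (p : String) :
    (PySem.Str.isIn "subtitle" (PySem.Str.lower p) &&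
      !PySem.Str.isIn "title" (PySem.Str.lower p)) = (pvLvl p == some 2) := by
  unfold pvLvl; split_ifs <;> simp_all

lemma pvTest3 (p : String) :
    (PySem.Str.isIn "content" (PySem.Str.lower p) &&
      (!PySem.Str.isIn "title" (PySem.Str.lower p) &&
       !PySem.Str.isIn "subtitle" (PySem.Str.lower p))) = (pvLvl p == some 3) := by
  unfold pvLvl; split_ifs <;> simp_all

lemma pvTest4 (p : String) :
    (PySem.Str.isIn "bullet" (PySem.Str.lower p) &&
      (!PySem.Str.isIn "title" (PySem.Str.lower p) &&
       (!PySem.Str.isIn "subtitle" (PySem.Str.lower p) &&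
        !PySem.Str.isIn "content" (PySem.Str.lower p)))) = (pvLvl p == some 4) := by
  unfold pvLvl; split_ifs <;> simp_all

lemma pvTest5 (p : String) :
    (PySem.Str.isIn "description" (PySem.Str.lower p) &&
      (!PySem.Str.isIn "title" (PySem.Str.lower p) &&
       (!PySem.Str.isIn "subtitle" (PySem.Str.lower p) &&
        (!PySem.Str.isIn "content" (PySem.Str.lower p) &&
         !PySem.Str.isIn "bullet" (PySem.Str.lower p))))) = (pvLvl p == some 5) := by
  unfold pvLvl; split_ifs <;> simp_all

lemma pvany_congr {α : Type} (l : List α) (f g : α → Bool) (h : ∀ x ∈ l, f x = g x) :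
    l.any f = l.any g := by
  induction l with
  | nil => rfl
  | cons a t ih =>
      simp only [List.any_cons, h a (by simp)]
      rw [ih (fun x hx => h x (by simp [hx]))]

theorem count_hierarchy_levels_py_spec : Claim_equal_count_hierarchy_levels_py := by
  intro content _
  show count_hierarchy_levels_py content = count_hierarchy_levels_py_alt content
  have hA : count_hierarchy_levels_py content
      = Int.ofNat (PySem.Set.ofList (content.filterMap (fun kv => pvLvl kv.1))).length := by
    unfold count_hierarchy_levels_py
    rw [pvFoldA]
    rfl
  set L := content.filterMap (fun kv => pvLvl kv.1) with hL
  have hmem : ∀ v : Int, v ∈ L ↔ ∃ kv ∈ content, pvLvl kv.1 = some v := by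
    intro v; simp [hL, List.mem_filterMap]
  have hperm : (PySem.Set.ofList L).Perm
      (([1, 2, 3, 4, 5] : List Int).filter (fun v => decide (v ∈ L))) := by
    rw [List.perm_ext_iff_of_nodup (PySem.Set.nodup_ofList L)
        (List.Nodup.filter _ (by decide))]
    intro v
    simp only [List.mem_filter, PySem.Set.mem_ofList, decide_eq_true_eq]
    constructor
    · intro hv
      rcases (hmem v).mp hv with ⟨kv, _, h⟩
      exact ⟨pvLvl_mem h, hv⟩
    · rintro ⟨_, hv⟩; exact hv
  have hany : ∀ v : Int, content.any (fun kv => pvLvl kv.1 == some v) = decide (v ∈ L) := by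
    intro v
    rw [Bool.eq_iff_iff]
    simp [List.any_eq_true, hmem v]
  rw [hA, hperm.length_eq]
  unfold count_hierarchy_levels_py_alt
  simp only [PySem.List.enumerate_cons, PySem.List.enumerate_nil, List.foldl_cons, List.foldl_nil,
    List.any_map, Function.comp_def, zero_add,
    show List.take ((0 : Int)).toNat ["title", "subtitle", "content", "bullet", "description"] = [] from rfl,
    show List.take ((1 : Int)).toNat ["title", "subtitle", "content", "bullet", "description"] = ["title"] from rfl,
    show List.take ((1 + 1 : Int)).toNat ["title", "subtitle", "content", "bullet", "description"] = ["title", "subtitle"] from rfl,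
    show List.take ((1 + 1 + 1 : Int)).toNat ["title", "subtitle", "content", "bullet", "description"] = ["title", "subtitle", "content"] from rfl,
    show List.take ((1 + 1 + 1 + 1 : Int)).toNat ["title", "subtitle", "content", "bullet", "description"] = ["title", "subtitle", "content", "bullet"] from rfl,
    List.all_cons, List.all_nil, Bool.and_true]
  rw [pvany_congr content _ _ (fun kv _ => pvTest1 kv.1),
      pvany_congr content _ _ (fun kv _ => pvTest2 kv.1),
      pvany_congr content _ _ (fun kv _ => pvTest3 kv.1),
      pvany_congr content _ _ (fun kv _ => pvTest4 kv.1),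
      pvany_congr content _ _ (fun kv _ => pvTest5 kv.1)]
  rw [hany 1, hany 2, hany 3, hany 4, hany 5]
  by_cases h1 : (1 : Int) ∈ L <;> by_cases h2 : (2 : Int) ∈ L <;>
    by_cases h3 : (3 : Int) ∈ L <;> by_cases h4 : (4 : Int) ∈ L <;>
    by_cases h5 : (5 : Int) ∈ L <;>
    simp [List.filter, h1, h2, h3, h4, h5]
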